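-- pv_equiv track=rewrite | github.com/ezw678/CodingBat | Python/logic_2.py | lone_sum
-- ===== SOURCE A (Python) =====
-- def lone_sum(a, b, c):
--   ol = [a, b, c]
--   nl = []
--   dl = []
--
--   for n in ol:
--     if not n in nl:
--       nl.append(n)
--     else:
--       dl.append(n)
--
--   sm = 0
--   for n in ol:
--     if n not in dl:
--       sm += n
--
--   return sm
-- ===== SOURCE B (Python) =====
-- def lone_sum(a, b, c):
--   if a == b:
--     if b == c:
--       return 0
--     return c
--   if a == c:
--     return b
--   if b == c:
--     return a
--   return a + b + c
-- ===== Notes on version B (the rewrite author's own statement) =====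
-- stated objective: simpler
-- what changed: Replaces A's two list-building passes (seen/duplicate lists plus a filtered summation pass) with a direct closed-form cascade of pairwise equality checks maintaining no lists.
import Mathlib
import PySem

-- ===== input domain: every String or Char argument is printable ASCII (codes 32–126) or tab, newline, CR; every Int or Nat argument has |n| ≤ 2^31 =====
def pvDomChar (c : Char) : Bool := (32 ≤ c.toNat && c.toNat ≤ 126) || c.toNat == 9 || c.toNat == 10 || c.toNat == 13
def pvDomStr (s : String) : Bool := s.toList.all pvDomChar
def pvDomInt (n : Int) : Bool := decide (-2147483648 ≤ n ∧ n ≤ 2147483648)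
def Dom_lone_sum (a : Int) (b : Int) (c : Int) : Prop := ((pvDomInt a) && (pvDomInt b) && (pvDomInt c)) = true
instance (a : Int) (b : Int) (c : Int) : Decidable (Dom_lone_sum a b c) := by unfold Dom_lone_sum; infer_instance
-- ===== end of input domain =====

-- B replaces A's two list-building passes with a closed-form cascade of pairwise equality checks (objective: simpler).


-- ===== PORT A =====
-- literal port of A: first pass splits [a,b,c] into seen-list nl and duplicate-list dl,
-- second pass sums the elements not in dl.
def lone_sum (a : Int) (b : Int) (c : Int) : Int :=
  let ol : List Int := [a, b, c]
  let p : List Int × List Int :=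
    ol.foldl (fun (p : List Int × List Int) n =>
      if ¬ n ∈ p.1 then (p.1 ++ [n], p.2) else (p.1, p.2 ++ [n])) ([], [])
  ol.foldl (fun sm n => if ¬ n ∈ p.2 then sm + n else sm) 0

-- ===== PORT B =====
-- B: closed-form cascade of pairwise equality checks, no lists.
def lone_sum_alt (a : Int) (b : Int) (c : Int) : Int :=
  if a = b then
    if b = c then 0 else c
  else if a = c then b
  else if b = c then a
  else a + b + c

-- ===== PRECONDITION & SPEC =====
def Spec_lone_sum (a : Int) (b : Int) (c : Int) (out : Int) : Prop := out = lone_sum_alt a b c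
instance (a : Int) (b : Int) (c : Int) (out : Int) : Decidable (Spec_lone_sum a b c out) := by unfold Spec_lone_sum; infer_instance

-- ===== CLAIM (what is proved, stated in full; the proofs are below) =====
def Claim_equal_lone_sum : Prop := ∀ (a : Int) (b : Int) (c : Int), Dom_lone_sum a b c → Spec_lone_sum a b c (lone_sum a b c)

-- ===== LEMMAS AND PROOFS =====

-- ===== VERDICT (by name: the statement is the Claim_ definition above) =====
theorem lone_sum_spec : Claim_equal_lone_sum := by
  intro a b c _
  unfold Spec_lone_sum
  simp only [lone_sum, lone_sum_alt, List.foldl]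
  split_ifs <;> simp_all <;> omega
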